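-- pv_equiv track=rewrite | github.com/micheloosterhof/aldegonde | lp.py | decrypt_pc_plus_cp
-- ===== SOURCE A (Python) =====
-- N = 29  # GF(29)
--
-- EA = 0  # EA rune value (29 % 29 = 0), fallback for div-by-zero
--
-- def safe_div(a: int, b: int) -> int:
--     """a / b in GF(29). Falls back to EA (0) when b = 0."""
--     if b == 0:
--         return EA
--     return (a * pow(b, N - 2, N)) % N
--
-- def decrypt_pc_plus_cp(C: list[int], primer_c: int, primer_p: int) -> list[int]:
--     """C(i) = P(i)*C(i-1) + C(i-1)*P(i-1)  =>  C(i) = C(i-1)*(P(i)+P(i-1))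
--        P(i)+P(i-1) = C(i)/C(i-1)  =>  P(i) = C(i)/C(i-1) - P(i-1)"""
--     P = []
--     prev_c = primer_c
--     prev_p = primer_p
--     for c in C:
--         p = (safe_div(c, prev_c) - prev_p) % N
--         P.append(p)
--         prev_c = c
--         prev_p = p
--     return P
-- ===== SOURCE B (Python) =====
-- N = 29  # GF(29)
--
-- EA = 0  # fallback for div-by-zero
--
-- def decrypt_pc_plus_cp(C: list[int], primer_c: int, primer_p: int) -> list[int]:
--     # Phase 1: table of consecutive GF(29) ratios r[i] = C[i] / C[i-1] (C[-1] := primer_c).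
--     ratios = [(c * pow(prev, N - 2, N)) % N if prev != 0 else EA
--               for prev, c in zip([primer_c] + C, C)]
--     # Phase 2: telescoping P(i) = (-1)^i * (r[0] - r[1] + ... +- r[i] - primer_p) mod 29,
--     # via one alternating-sum accumulator.
--     out = []
--     acc = 0
--     sign = 1
--     for r in ratios:
--         acc += sign * r
--         out.append((sign * (acc - primer_p)) % N)
--         sign = -sign
--     return out
-- ===== Notes on version B (the rewrite author's own statement) =====
-- stated objective: alternative
-- what changed: A's single interleaved loop carrying (prev_c, prev_p) is split into two visible phases: a table of consecutive GF(29) ratios built by zipping the primer-prepended ciphertext with itself, then a telescoping pass that emits each plaintext as an alternating-sign partial sum of ratios minus/plus the primer, reduced mod 29 per element.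
import Mathlib
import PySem

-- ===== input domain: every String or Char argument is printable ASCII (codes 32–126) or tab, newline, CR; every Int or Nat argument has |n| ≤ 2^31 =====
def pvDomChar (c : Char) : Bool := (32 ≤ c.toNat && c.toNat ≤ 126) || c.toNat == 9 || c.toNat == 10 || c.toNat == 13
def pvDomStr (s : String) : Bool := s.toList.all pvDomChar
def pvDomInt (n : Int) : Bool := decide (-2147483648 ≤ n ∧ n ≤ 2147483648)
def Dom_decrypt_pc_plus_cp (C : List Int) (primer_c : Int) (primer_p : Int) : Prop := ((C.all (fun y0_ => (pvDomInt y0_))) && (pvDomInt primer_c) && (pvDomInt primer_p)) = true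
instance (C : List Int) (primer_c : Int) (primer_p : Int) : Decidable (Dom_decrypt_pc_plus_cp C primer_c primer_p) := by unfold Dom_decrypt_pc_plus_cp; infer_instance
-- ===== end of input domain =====

-- B splits A's single carried-state loop into a ratio table plus an alternating telescoping pass (objective: alternative decomposition, same cost).

-- ===== PORT A =====
-- safe_div: a / b in GF(29), 0 when b = 0; pow(b, 27, 29) is PySem.Int.powMod
def pvSafeDiv (a b : Int) : Int :=
  if b = 0 then 0 else PySem.Int.mod (a * PySem.Int.powMod b 27 29) 29

def decrypt_pc_plus_cp (C : List Int) (primer_c : Int) (primer_p : Int) : List Int :=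
  (C.foldl (fun (st : List Int × Int × Int) c =>
      let p := PySem.Int.mod (pvSafeDiv c st.2.1 - st.2.2) 29
      (st.1 ++ [p], c, p))
    (([] : List Int), primer_c, primer_p)).1

-- ===== PORT B =====
def decrypt_pc_plus_cp_alt (C : List Int) (primer_c : Int) (primer_p : Int) : List Int :=
  -- phase 1: table of consecutive GF(29) ratios (zip of primer-prepended C with C)
  let ratios := ((primer_c :: C).zip C).map (fun pr =>
    if pr.1 ≠ 0 then PySem.Int.mod (pr.2 * PySem.Int.powMod pr.1 27 29) 29 else 0)
  -- phase 2: alternating-sum telescoping pass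
  (ratios.foldl (fun (st : List Int × Int × Int) r =>
      let acc := st.2.1 + st.2.2 * r
      (st.1 ++ [PySem.Int.mod (st.2.2 * (acc - primer_p)) 29], acc, -st.2.2))
    (([] : List Int), 0, 1)).1

-- ===== PRECONDITION & SPEC =====
def Spec_decrypt_pc_plus_cp (C : List Int) (primer_c : Int) (primer_p : Int) (out : List Int) : Prop := out = decrypt_pc_plus_cp_alt C primer_c primer_p
instance (C : List Int) (primer_c : Int) (primer_p : Int) (out : List Int) : Decidable (Spec_decrypt_pc_plus_cp C primer_c primer_p out) := by unfold Spec_decrypt_pc_plus_cp; infer_instance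

-- ===== CLAIM (what is proved, stated in full; the proofs are below) =====
def Claim_equal_decrypt_pc_plus_cp : Prop := ∀ (C : List Int) (primer_c : Int) (primer_p : Int), Dom_decrypt_pc_plus_cp C primer_c primer_p → Spec_decrypt_pc_plus_cp C primer_c primer_p (decrypt_pc_plus_cp C primer_c primer_p)

-- ===== LEMMAS AND PROOFS =====

-- Loop correspondence: A's carried (prev_c, prev_p) loop equals B's ratio-table +
-- alternating-accumulator loop, under the invariant pp ≡ -sign·(acc - primer_p) (mod 29).
lemma pv_loop_eq (primer_p : Int) :
    ∀ (C : List Int) (pc pp acc sign : Int) (out : List Int),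
      (sign = 1 ∨ sign = -1) →
      pp % 29 = (-sign * (acc - primer_p)) % 29 →
      (C.foldl (fun (st : List Int × Int × Int) c =>
          let p := PySem.Int.mod (pvSafeDiv c st.2.1 - st.2.2) 29
          (st.1 ++ [p], c, p)) (out, pc, pp)).1 =
      ((((pc :: C).zip C).map (fun pr =>
          if pr.1 ≠ 0 then PySem.Int.mod (pr.2 * PySem.Int.powMod pr.1 27 29) 29 else 0)).foldl
          (fun (st : List Int × Int × Int) r =>
            let acc := st.2.1 + st.2.2 * r
            (st.1 ++ [PySem.Int.mod (st.2.2 * (acc - primer_p)) 29], acc, -st.2.2))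
          (out, acc, sign)).1 := by
  intro C
  induction C with
  | nil => intro pc pp acc sign out _ _; simp
  | cons c rest ih =>
    intro pc pp acc sign out hsign hinv
    have hgf : (if pc ≠ 0 then PySem.Int.mod (c * PySem.Int.powMod pc 27 29) 29 else 0)
        = pvSafeDiv c pc := by unfold pvSafeDiv; split_ifs with h h2 <;> simp_all
    simp only [List.zip_cons_cons, List.map_cons, List.foldl_cons, hgf]
    have hm : ∀ x : Int, PySem.Int.mod x 29 = x % 29 :=
      fun _ => PySem.Int.mod_eq_emod_of_pos (by norm_num)
    have hp : PySem.Int.mod (pvSafeDiv c pc - pp) 29 =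
        PySem.Int.mod (sign * (acc + sign * pvSafeDiv c pc - primer_p)) 29 := by
      rw [hm, hm]
      rcases hsign with h | h <;> subst h <;> omega
    rw [hp]
    apply ih
    · rcases hsign with h | h <;> subst h <;> [right; left] <;> norm_num
    · rw [hm]
      rcases hsign with h | h <;> subst h <;> omega

-- ===== VERDICT (by name: the statement is the Claim_ definition above) =====
theorem decrypt_pc_plus_cp_spec : Claim_equal_decrypt_pc_plus_cp := by
  intro C primer_c primer_p _
  unfold Spec_decrypt_pc_plus_cp decrypt_pc_plus_cp decrypt_pc_plus_cp_alt
  exact pv_loop_eq primer_p C primer_c primer_p 0 1 [] (Or.inl rfl) (by omega)
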